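-- pv_equiv track=rewrite | github.com/ParkInoh/Python-Elegance-Measure | server/public/MId103_5_final.py | find_len_seq
-- ===== SOURCE A (Python) =====
-- def find_len_seq(integer):
--     set_int = []
--
--     if integer == 1:
--         return 1
--
--     while True:
--
--         integer = sum([int(d) ** 2 for d in list(str(integer))])
--
--         if integer in set_int:
--             return -1
--         set_int.append(integer)
--
--         if integer == 1:
--             return len(set_int) + 1
-- ===== SOURCE B (Python) =====
-- def find_len_seq(integer):
--     # No visited list: iterate the digit-square-sum map with a step counter,
--     # using the invariant that the iteration reaches 1 iff happy and otherwise
--     # falls into the cycle through 4 (or sticks at the fixed point 0).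
--     if integer == 1:
--         return 1
--     cur = integer
--     steps = 0
--     while True:
--         cur = sum(int(d) ** 2 for d in str(cur))
--         steps += 1
--         if cur == 1:
--             return steps + 1
--         if cur == 4 or cur == 0:
--             return -1
-- ===== Notes on version B (the rewrite author's own statement) =====
-- stated objective: simpler
-- what changed: Replaced A's growing visited-list with cycle detection (O(k) membership scan per step, loop until a repeat) by a constant-memory step counter that stops as soon as the iterate hits 1, 4 or 0, using the invariant that base-10 digit-square-sum iteration reaches 1 iff happy and otherwise passes through the 4-cycle (or the fixed point 0).
import Mathlib
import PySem

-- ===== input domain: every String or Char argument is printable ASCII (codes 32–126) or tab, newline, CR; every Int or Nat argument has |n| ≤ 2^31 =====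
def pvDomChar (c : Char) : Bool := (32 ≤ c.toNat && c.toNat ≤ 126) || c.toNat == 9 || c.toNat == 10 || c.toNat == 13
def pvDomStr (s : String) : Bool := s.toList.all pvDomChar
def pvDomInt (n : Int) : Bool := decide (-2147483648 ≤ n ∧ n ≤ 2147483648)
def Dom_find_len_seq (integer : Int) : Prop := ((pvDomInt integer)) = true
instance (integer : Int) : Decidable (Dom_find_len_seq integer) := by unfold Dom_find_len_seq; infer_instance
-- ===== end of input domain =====

set_option maxRecDepth 100000

-- B replaces A's growing visited-list cycle detection by a constant-memory step counter
-- that stops when the digit-square-sum iterate hits 1, 4 or 0 (objective: simpler).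

-- ===== PORT A =====

-- sum([int(d) ** 2 for d in list(str(integer))]); exact for integer ≥ 0
-- (on a negative integer Python's int('-') raises ValueError; Pre_ excludes negatives)
def digitSquareSum (integer : Int) : Int :=
  ((PySem.Int.toStr integer).toList.map
    (fun d => ((PySem.Int.ofStr? (String.ofList [d])).getD 0) ^ 2)).sum

-- the while-loop of A; fuel only makes the recursion total (proved unreachable on Pre_)
def findLoopA (fuel : Nat) (set_int : List Int) (integer : Int) : Int :=
  match fuel with
  | 0 => 0
  | f + 1 =>
    let integer' := digitSquareSum integer
    if set_int.contains integer' then -1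
    else
      let set_int' := set_int ++ [integer']
      if integer' = 1 then (set_int'.length : Int) + 1
      else findLoopA f set_int' integer'

def find_len_seq (integer : Int) : Int :=
  if integer = 1 then 1 else findLoopA 1000 [] integer

-- ===== PORT B =====

-- the while-loop of B: a step counter, no visited list
def findLoopB (fuel : Nat) (steps : Int) (cur : Int) : Int :=
  match fuel with
  | 0 => 0
  | f + 1 =>
    let cur' := digitSquareSum cur
    let steps' := steps + 1
    if cur' = 1 then steps' + 1
    else if cur' = 4 ∨ cur' = 0 then -1
    else findLoopB f steps' cur'

def find_len_seq_alt (integer : Int) : Int :=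
  if integer = 1 then 1 else findLoopB 1000 0 integer

-- ===== PRECONDITION & SPEC =====
-- Pre_ excludes negative integers: there str(integer) starts with '-' and Python's int('-')
-- raises ValueError in both A and B.
def Pre_find_len_seq (integer : Int) : Prop := 0 ≤ integer
instance (integer : Int) : Decidable (Pre_find_len_seq integer) := by unfold Pre_find_len_seq; infer_instance

def pvWitness_find_len_seq : Int := (7)

def Spec_find_len_seq (integer : Int) (out : Int) : Prop := out = find_len_seq_alt integer
instance (integer : Int) (out : Int) : Decidable (Spec_find_len_seq integer out) := by unfold Spec_find_len_seq; infer_instance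

-- ===== CLAIM (what is proved, stated in full; the proofs are below) =====
def Claim_equal_find_len_seq : Prop := ∀ (integer : Int), Dom_find_len_seq integer → Pre_find_len_seq integer → Spec_find_len_seq integer (find_len_seq integer)

-- ===== LEMMAS AND PROOFS =====

-- arithmetic digit-square-sum (for reasoning; valid for m ≤ 999)
def stepN (m : Nat) : Nat := (m % 10)^2 + (m / 10 % 10)^2 + (m / 100 % 10)^2

-- digit-square-sum via Nat.digits
def dssN (m : Nat) : Nat := ((Nat.digits 10 m).map (fun d => d^2)).sum

-- bounded search: does the stepN-orbit of v meet {1, 4, 0} within k steps?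
def goN : Nat → Nat → Bool
  | 0, _ => false
  | k+1, v => (v == 1 || v == 4 || v == 0) || goN k (stepN v)

-- the 8-cycle of the digit-square-sum map together with the fixed point 0
def cycC : List Int := [4, 16, 37, 58, 89, 145, 42, 20, 0]

-- Nat.toDigitsCore characterised by Nat.digits
lemma toDigitsCore_eq (f : Nat) : ∀ (m : Nat) (acc : List Char), m < f →
    Nat.toDigitsCore 10 f m acc =
      (if m = 0 then ['0'] else ((Nat.digits 10 m).map Nat.digitChar).reverse) ++ acc := by
  induction f with
  | zero => intro m acc h; omega
  | succ f ih =>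
    intro m acc h
    rw [Nat.toDigitsCore]
    by_cases h0 : m / 10 = 0
    · simp only [h0]
      by_cases hm : m = 0
      · subst hm; simp; rfl
      · have hlt : m < 10 := by omega
        rw [Nat.digits_def' (by norm_num) (by omega)]
        have hnil : Nat.digits 10 (m / 10) = [] := by rw [h0]; simp
        rw [hnil]
        simp [Nat.mod_eq_of_lt hlt, hm]
    · simp only [h0, if_false]
      have hm : m ≠ 0 := by omega
      have hd : m / 10 < f := by
        have := Nat.div_lt_self (by omega : 0 < m) (by norm_num : 1 < 10)
        omega
      rw [ih (m / 10) _ hd]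
      rw [if_neg h0]
      rw [Nat.digits_def' (by norm_num : 1 < 10) (by omega : 0 < m)]
      simp [hm]

lemma toChars_eq (m : Nat) : PySem.Int.toChars (m : Int) =
    if m = 0 then ['0'] else ((Nat.digits 10 m).map Nat.digitChar).reverse := by
  unfold PySem.Int.toChars
  rw [if_neg (by omega)]
  have htn : ((m : Int)).toNat = m := rfl
  rw [htn]
  unfold Nat.toDigits
  rw [toDigitsCore_eq (m + 1) m [] (by omega)]
  simp

lemma digitChar_sq (d : Nat) (hd : d < 10) :
    ((PySem.Int.ofStr? (String.ofList [Nat.digitChar d])).getD 0) ^ 2 = ((d ^ 2 : Nat) : Int) := by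
  interval_cases d <;> decide

lemma dss_eq_dssN (v : Int) (h : 0 ≤ v) : digitSquareSum v = (dssN v.toNat : Int) := by
  obtain ⟨m, rfl⟩ : ∃ m : Nat, v = (m : Int) := ⟨v.toNat, (Int.toNat_of_nonneg h).symm⟩
  unfold digitSquareSum dssN
  rw [PySem.Int.toList_toStr, toChars_eq, Int.toNat_natCast]
  by_cases hm : m = 0
  · subst hm; simp; decide
  · rw [if_neg hm]
    rw [List.map_reverse, List.sum_reverse, List.map_map, Nat.cast_list_sum, List.map_map]
    congr 1
    apply List.map_congr_left
    intro d hd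
    exact digitChar_sq d (Nat.digits_lt_base (by norm_num) hd)

lemma dssN_step (m : Nat) : dssN m = (m % 10)^2 + dssN (m / 10) := by
  by_cases hm : m = 0
  · subst hm; simp [dssN]
  · unfold dssN
    rw [Nat.digits_def' (by norm_num : 1 < 10) (by omega : 0 < m)]
    simp

lemma dssN_eq_stepN (m : Nat) (h : m ≤ 999) : dssN m = stepN m := by
  rw [dssN_step, dssN_step, dssN_step]
  have h1000 : m / 10 / 10 / 10 = 0 := by omega
  have h100 : m / 10 / 10 = m / 100 := by omega
  rw [h1000, h100, stepN]
  simp [dssN]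
  ring

lemma sum_sq_le (l : List Nat) (h : ∀ d ∈ l, d < 10) :
    (l.map (fun d => d^2)).sum ≤ 81 * l.length := by
  induction l with
  | nil => simp
  | cons a t ih =>
    have ha : a < 10 := h a (by simp)
    have h81 : a ^ 2 ≤ 81 := by nlinarith
    have ht := ih (fun d hd => h d (by simp [hd]))
    simp only [List.map_cons, List.sum_cons, List.length_cons]
    calc a ^ 2 + (t.map (fun d => d^2)).sum ≤ 81 + 81 * t.length := by omega
      _ = 81 * (t.length + 1) := by ring

lemma dss_big (v : Int) (h0 : 0 ≤ v) (hB : v ≤ 2147483648) :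
    0 ≤ digitSquareSum v ∧ digitSquareSum v ≤ 810 := by
  rw [dss_eq_dssN v h0]
  refine ⟨by positivity, ?_⟩
  have hlen : (Nat.digits 10 v.toNat).length ≤ 10 := by
    rw [Nat.digits_length_le_iff (by norm_num)]
    omega
  have hd : ∀ d ∈ Nat.digits 10 v.toNat, d < 10 :=
    fun d hd => Nat.digits_lt_base (by norm_num) hd
  have := sum_sq_le _ hd
  have : dssN v.toNat ≤ 810 := by unfold dssN; omega
  omega

lemma dss_small (v : Int) (h0 : 0 ≤ v) (h9 : v ≤ 999) :
    digitSquareSum v = (stepN v.toNat : Int) := by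
  rw [dss_eq_dssN v h0, dssN_eq_stepN _ (by omega)]

lemma stepN_closed : ∀ m, m < 811 → stepN m ≤ 810 := by decide

lemma goN_all : ∀ m, m < 811 → goN 40 m = true := by decide

lemma goN_spec : ∀ (k v : Nat), goN k v = true →
    ∃ i, i < k ∧ (stepN^[i] v = 1 ∨ stepN^[i] v = 4 ∨ stepN^[i] v = 0) := by
  intro k
  induction k with
  | zero => intro v h; simp [goN] at h
  | succ k ih =>
    intro v h
    simp only [goN, Bool.or_eq_true, beq_iff_eq] at h
    rcases h with h | h
    · exact ⟨0, by omega, by tauto⟩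
    · obtain ⟨i, hi, hv⟩ := ih _ h
      exact ⟨i + 1, by omega, by simpa [Function.iterate_succ_apply] using hv⟩

-- the trajectory of the loop value: traj n i = the value after i+1 digit-square-sum steps
def traj (n : Int) : Nat → Int
  | 0 => digitSquareSum n
  | i + 1 => digitSquareSum (traj n i)

lemma traj_shift (n : Int) (i : Nat) : traj (digitSquareSum n) i = traj n (i + 1) := by
  induction i with
  | zero => rfl
  | succ i ih => simp only [traj, ih]

lemma traj_bound (n : Int) (h0 : 0 ≤ n) (hB : n ≤ 2147483648) :
    ∀ i, 0 ≤ traj n i ∧ traj n i ≤ 810 := by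
  intro i
  induction i with
  | zero => exact dss_big n h0 hB
  | succ i ih =>
    show 0 ≤ digitSquareSum (traj n i) ∧ digitSquareSum (traj n i) ≤ 810
    rw [dss_small _ ih.1 (by omega)]
    have := stepN_closed (traj n i).toNat (by omega)
    omega

lemma traj_toNat (n : Int) (h0 : 0 ≤ n) (hB : n ≤ 2147483648) :
    ∀ i, (traj n i).toNat = stepN^[i] (traj n 0).toNat := by
  intro i
  induction i with
  | zero => rfl
  | succ i ih =>
    have hb := traj_bound n h0 hB i
    show (digitSquareSum (traj n i)).toNat = _
    rw [dss_small _ hb.1 (by omega)]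
    rw [Function.iterate_succ_apply', ← ih]
    omega

-- the orbit meets {1, 4, 0} within 40 steps
lemma traj_meets (n : Int) (h0 : 0 ≤ n) (hB : n ≤ 2147483648) :
    ∃ i, i < 40 ∧ (traj n i = 1 ∨ traj n i = 4 ∨ traj n i = 0) := by
  have hb0 := traj_bound n h0 hB 0
  obtain ⟨i, hi, hv⟩ := goN_spec 40 (traj n 0).toNat (goN_all _ (by omega))
  refine ⟨i, hi, ?_⟩
  have hco := traj_toNat n h0 hB i
  have hbi := traj_bound n h0 hB i
  rcases hv with h | h | h
  · exact Or.inl (by omega)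
  · exact Or.inr (Or.inl (by omega))
  · exact Or.inr (Or.inr (by omega))

lemma cycC_closed (v : Int) (hv : v ∈ cycC) : digitSquareSum v ∈ cycC := by
  have hsmall : ∀ w : Int, w ∈ cycC → 0 ≤ w ∧ w ≤ 999 := by decide
  obtain ⟨h0, h9⟩ := hsmall v hv
  rw [dss_small v h0 h9]
  fin_cases hv <;> decide

lemma traj_in_cyc (n : Int) (i : Nat) (hi : traj n i ∈ cycC) :
    ∀ m, i ≤ m → traj n m ∈ cycC := by
  intro m hm
  induction m with
  | zero => simpa [Nat.le_zero.mp hm] using hi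
  | succ m ih =>
    rcases Nat.lt_or_ge i (m + 1) with h | h
    · exact cycC_closed _ (ih (by omega))
    · have he : i = m + 1 := by omega
      subst he; exact hi

lemma one_not_cyc : (1 : Int) ∉ cycC := by decide

-- before the first 1, all trajectory values are pairwise distinct
lemma distinct_first_one (n : Int) (j : Nat) (h1 : traj n j = 1)
    (hno : ∀ i, i < j → traj n i ≠ 1) :
    ∀ a b, a < b → b ≤ j → traj n a ≠ traj n b := by
  intro a b hab hbj heq
  have hper : ∀ t, traj n (a + t + (b - a)) = traj n (a + t) := by
    intro t
    induction t with
    | zero => simpa [Nat.add_sub_cancel' (Nat.le_of_lt hab)] using heq.symm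
    | succ t ih =>
      have e1 : a + (t+1) + (b-a) = (a + t + (b-a)) + 1 := by omega
      have e2 : a + (t+1) = (a + t) + 1 := by omega
      rw [e1, e2]
      show digitSquareSum _ = digitSquareSum _
      rw [ih]
  have hjb : traj n (j - (b - a)) = 1 := by
    have hp := hper (j - a - (b - a))
    have e : a + (j - a - (b - a)) + (b - a) = j := by omega
    have e2 : a + (j - a - (b - a)) = j - (b - a) := by omega
    rw [e, e2] at hp
    rw [← hp]
    exact h1
  exact hno (j - (b - a)) (by omega) hjb

-- characterisation of A's loop when the trajectory reaches 1 first
lemma A_hit (j : Nat) : ∀ (fuel : Nat) (set : List Int) (cur : Int), j < fuel →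
    traj cur j = 1 →
    (∀ i, i ≤ j → traj cur i ∉ set) →
    (∀ a b, a < b → b ≤ j → traj cur a ≠ traj cur b) →
    findLoopA fuel set cur = (set.length : Int) + j + 2 := by
  induction j with
  | zero =>
    intro fuel set cur hf h1 hnotin _
    obtain ⟨f, rfl⟩ : ∃ f, fuel = f + 1 := ⟨fuel - 1, by omega⟩
    simp only [findLoopA]
    have hmem : digitSquareSum cur ∉ set := hnotin 0 (Nat.le_refl 0)
    have hds : digitSquareSum cur = 1 := by exact h1
    rw [if_neg (by simpa [List.contains_iff_mem] using hmem), if_pos hds]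
    simp only [List.length_append, List.length_singleton, List.length_nil]
    push_cast
    ring
  | succ j ih =>
    intro fuel set cur hf h1 hnotin hdist
    obtain ⟨f, rfl⟩ : ∃ f, fuel = f + 1 := ⟨fuel - 1, by omega⟩
    simp only [findLoopA]
    have hmem : digitSquareSum cur ∉ set := hnotin 0 (by omega)
    have hne1 : digitSquareSum cur ≠ 1 := by
      have hd := hdist 0 (j+1) (by omega) (by omega)
      intro he
      exact hd (by rw [(by exact he : traj cur 0 = 1), h1])
    rw [if_neg (by simpa [List.contains_iff_mem] using hmem), if_neg hne1]
    rw [ih f (set ++ [digitSquareSum cur]) (digitSquareSum cur) (by omega)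
      (by rw [traj_shift]; exact h1)
      (by
        intro i hi
        rw [traj_shift]
        simp only [List.mem_append, List.mem_singleton, not_or]
        refine ⟨hnotin (i+1) (by omega), ?_⟩
        exact (hdist 0 (i+1) (by omega) (by omega)).symm)
      (by
        intro a b hab hbj
        rw [traj_shift, traj_shift]
        exact hdist (a+1) (b+1) (by omega) (by omega))]
    simp only [List.length_append, List.length_singleton]
    push_cast
    ring

-- a duplicate-free list of values in [0, 810] has at most 811 entries (pigeonhole)
lemma nodup_bounded_len (set : List Int) (hnodup : set.Nodup)
    (hset : ∀ x ∈ set, 0 ≤ x ∧ x ≤ 810) : set.length ≤ 811 := by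
  have h1 : set.toFinset ⊆ Finset.Icc (0:Int) 810 := by
    intro x hx
    exact Finset.mem_Icc.mpr (hset x (List.mem_toFinset.mp hx))
  have h2 := Finset.card_le_card h1
  rw [List.toFinset_card_of_nodup hnodup, Int.card_Icc] at h2
  simpa using h2

-- characterisation of A's loop when the trajectory never reaches 1
lemma A_neg : ∀ (fuel : Nat) (set : List Int) (cur : Int),
    (∀ i, traj cur i ≠ 1) →
    (∀ i, 0 ≤ traj cur i ∧ traj cur i ≤ 810) →
    set.Nodup → (∀ x ∈ set, 0 ≤ x ∧ x ≤ 810) →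
    812 ≤ fuel + set.length →
    findLoopA fuel set cur = -1 := by
  intro fuel
  induction fuel with
  | zero =>
    intro set cur _ _ hnodup hset hlen
    have := nodup_bounded_len set hnodup hset
    omega
  | succ f ih =>
    intro set cur hno hb hnodup hset hlen
    simp only [findLoopA]
    by_cases hmem : digitSquareSum cur ∈ set
    · rw [if_pos (by simpa [List.contains_iff_mem] using hmem)]
    · rw [if_neg (by simpa [List.contains_iff_mem] using hmem), if_neg (by exact hno 0 : digitSquareSum cur ≠ 1)]
      apply ih
      · intro i; rw [traj_shift]; exact hno (i+1)
      · intro i; rw [traj_shift]; exact hb (i+1)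
      · rw [List.nodup_append]
        refine ⟨hnodup, List.nodup_singleton _, ?_⟩
        intro a ha b hb
        rw [List.mem_singleton] at hb
        subst hb
        exact fun he => hmem (he ▸ ha)
      · intro x hx
        rcases List.mem_append.mp hx with h | h
        · exact hset x h
        · rw [List.mem_singleton.mp h]; exact hb 0
      · simp only [List.length_append, List.length_singleton]; omega

-- characterisation of B's loop when the trajectory reaches 1 first
lemma B_hit (j : Nat) : ∀ (fuel : Nat) (steps cur : Int), j < fuel →
    traj cur j = 1 →
    (∀ i, i < j → traj cur i ≠ 1) →
    findLoopB fuel steps cur = steps + j + 2 := by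
  induction j with
  | zero =>
    intro fuel steps cur hf h1 _
    obtain ⟨f, rfl⟩ : ∃ f, fuel = f + 1 := ⟨fuel - 1, by omega⟩
    simp only [findLoopB]
    have hds : digitSquareSum cur = 1 := by exact h1
    rw [if_pos hds]
    push_cast; ring
  | succ j ih =>
    intro fuel steps cur hf h1 hno
    obtain ⟨f, rfl⟩ : ∃ f, fuel = f + 1 := ⟨fuel - 1, by omega⟩
    simp only [findLoopB]
    have hne1 : digitSquareSum cur ≠ 1 := by exact hno 0 (by omega)
    have hne40 : ¬ (digitSquareSum cur = 4 ∨ digitSquareSum cur = 0) := by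
      intro h
      have hc : digitSquareSum cur ∈ cycC := by rcases h with h | h <;> simp [cycC, h]
      have hmem := traj_in_cyc cur 0 hc (j+1) (by omega)
      rw [h1] at hmem
      exact one_not_cyc hmem
    rw [if_neg hne1, if_neg hne40]
    rw [ih f (steps + 1) (digitSquareSum cur) (by omega)
      (by rw [traj_shift]; exact h1)
      (by intro i hi; rw [traj_shift]; exact hno (i+1) (by omega))]
    push_cast; ring

-- characterisation of B's loop when the trajectory reaches 4 or 0 first
lemma B_neg (j : Nat) : ∀ (fuel : Nat) (steps cur : Int), j < fuel →
    (traj cur j = 4 ∨ traj cur j = 0) →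
    (∀ i, i < j → traj cur i ≠ 1 ∧ traj cur i ≠ 4 ∧ traj cur i ≠ 0) →
    (∀ i, traj cur i ≠ 1) →
    findLoopB fuel steps cur = -1 := by
  induction j with
  | zero =>
    intro fuel steps cur hf h4 _ hno1
    obtain ⟨f, rfl⟩ : ∃ f, fuel = f + 1 := ⟨fuel - 1, by omega⟩
    simp only [findLoopB]
    have hds4 : digitSquareSum cur = 4 ∨ digitSquareSum cur = 0 := by exact h4
    rw [if_neg (by exact hno1 0 : digitSquareSum cur ≠ 1), if_pos hds4]
  | succ j ih =>
    intro fuel steps cur hf h4 hno hno1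
    obtain ⟨f, rfl⟩ : ∃ f, fuel = f + 1 := ⟨fuel - 1, by omega⟩
    simp only [findLoopB]
    obtain ⟨hne1, hne4, hne0⟩ := hno 0 (by omega)
    have hne1' : digitSquareSum cur ≠ 1 := by exact hne1
    have hne4' : digitSquareSum cur ≠ 4 := by exact hne4
    have hne0' : digitSquareSum cur ≠ 0 := by exact hne0
    rw [if_neg hne1', if_neg (by tauto : ¬ (digitSquareSum cur = 4 ∨ digitSquareSum cur = 0))]
    exact ih f (steps + 1) (digitSquareSum cur) (by omega)
      (by rw [traj_shift]; exact h4)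
      (by intro i hi; rw [traj_shift]; exact hno (i+1) (by omega))
      (by intro i; rw [traj_shift]; exact hno1 (i+1))

-- ===== VERDICT (by name: the statement is the Claim_ definition above) =====
theorem find_len_seq_spec : Claim_equal_find_len_seq := by
  intro integer hdom hpre
  unfold Spec_find_len_seq find_len_seq find_len_seq_alt
  have h0 : 0 ≤ integer := hpre
  have hB : integer ≤ 2147483648 := (of_decide_eq_true hdom).2
  by_cases h1 : integer = 1
  · rw [if_pos h1, if_pos h1]
  · rw [if_neg h1, if_neg h1]
    obtain ⟨k, hk40, hkval⟩ := traj_meets integer h0 hB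
    by_cases H1 : ∃ i, traj integer i = 1
    · -- the trajectory reaches 1; both sides return j + 2 for the minimal such j
      have hj1 : traj integer (Nat.find H1) = 1 := Nat.find_spec H1
      have hno : ∀ i, i < Nat.find H1 → traj integer i ≠ 1 :=
        fun i hi => Nat.find_min H1 hi
      have hjlt : Nat.find H1 < 40 := by
        rcases hkval with h | h | h
        · exact Nat.lt_of_le_of_lt (Nat.find_min' H1 h) (by omega)
        all_goals {
          by_cases hjk : Nat.find H1 < k
          · omega
          · exfalso
            have hc : traj integer k ∈ cycC := by rw [h]; decide
            have hmem := traj_in_cyc integer k hc (Nat.find H1) (by omega)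
            rw [hj1] at hmem
            exact one_not_cyc hmem }
      rw [A_hit (Nat.find H1) 1000 [] integer (by omega) hj1
        (by intro i _; simp)
        (distinct_first_one integer (Nat.find H1) hj1 hno)]
      rw [B_hit (Nat.find H1) 1000 0 integer (by omega) hj1 hno]
      simp
    · -- the trajectory never reaches 1: both sides return -1
      push Not at H1
      have hk4 : ∃ i, traj integer i = 4 ∨ traj integer i = 0 := by
        rcases hkval with h | h | h
        · exact absurd h (H1 k)
        · exact ⟨k, Or.inl h⟩
        · exact ⟨k, Or.inr h⟩
      have hj4 := Nat.find_spec hk4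
      have hnom : ∀ i, i < Nat.find hk4 →
          traj integer i ≠ 1 ∧ traj integer i ≠ 4 ∧ traj integer i ≠ 0 := by
        intro i hi
        have hm := Nat.find_min hk4 hi
        exact ⟨H1 i, by tauto, by tauto⟩
      have hjlt : Nat.find hk4 < 40 := by
        have hle : Nat.find hk4 ≤ k := by
          apply Nat.find_min'
          rcases hkval with h | h | h
          · exact absurd h (H1 k)
          · exact Or.inl h
          · exact Or.inr h
        omega
      rw [A_neg 1000 [] integer H1 (traj_bound integer h0 hB) (by simp) (by simp) (by simp)]
      rw [B_neg (Nat.find hk4) 1000 0 integer (by omega) hj4 hnom H1]
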